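-- pv_equiv track=rewrite | github.com/fabiomartinezmerino/python_tests | codewars7.py | round_to_next5
-- ===== SOURCE A (Python) =====
-- def round_to_next5(n):
--     # Round to next (higher) multiple of 5
--     if n%5 == 0:
--         pass
--     else:
--         while True:
--             n = n +1
--             if n%5 == 0:
--                 break
--
--     return n
-- ===== SOURCE B (Python) =====
-- def round_to_next5(n):
--     # Round to next (higher) multiple of 5: closed form, no loop
--     return n + (-n % 5)
-- ===== Notes on version B (the rewrite author's own statement) =====
-- stated objective: simpler
-- what changed: Replaced the increment-until-divisible while loop with the closed-form expression n + (-n % 5).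
import Mathlib
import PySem

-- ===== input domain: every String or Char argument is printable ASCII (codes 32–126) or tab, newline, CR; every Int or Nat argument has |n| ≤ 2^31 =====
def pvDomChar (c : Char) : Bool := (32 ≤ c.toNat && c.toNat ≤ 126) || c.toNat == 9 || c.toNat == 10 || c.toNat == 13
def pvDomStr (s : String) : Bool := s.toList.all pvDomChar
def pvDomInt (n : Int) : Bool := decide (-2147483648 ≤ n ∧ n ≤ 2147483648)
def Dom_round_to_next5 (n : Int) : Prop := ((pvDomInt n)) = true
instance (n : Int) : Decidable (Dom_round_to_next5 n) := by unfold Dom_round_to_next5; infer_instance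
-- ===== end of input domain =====

-- B replaces A's increment-until-divisible loop with the closed form n + (-n % 5) (simpler).

-- ===== PORT A =====
-- termination helper for the port's loop: Python's % with positive divisor 5 is emod
theorem pymod5 (a : Int) : PySem.Int.mod a 5 = a % 5 :=
  PySem.Int.mod_eq_emod_of_pos (by norm_num)

-- A's 'while True: n = n + 1; if n % 5 == 0: break' loop; terminates since the distance
-- to the next multiple of 5 strictly decreases.
def round_to_next5_loop (n : Int) : Int :=
  if PySem.Int.mod (n + 1) 5 = 0 then n + 1 else round_to_next5_loop (n + 1)
termination_by (PySem.Int.mod (-(n + 1)) 5).toNat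
decreasing_by
  simp only [pymod5] at *
  omega

def round_to_next5 (n : Int) : Int :=
  if PySem.Int.mod n 5 = 0 then n else round_to_next5_loop n

-- ===== PORT B =====
def round_to_next5_alt (n : Int) : Int := n + PySem.Int.mod (-n) 5

-- ===== PRECONDITION & SPEC =====
def Spec_round_to_next5 (n : Int) (out : Int) : Prop := out = round_to_next5_alt n
instance (n : Int) (out : Int) : Decidable (Spec_round_to_next5 n out) := by unfold Spec_round_to_next5; infer_instance

-- ===== CLAIM (what is proved, stated in full; the proofs are below) =====
def Claim_equal_round_to_next5 : Prop := ∀ (n : Int), Dom_round_to_next5 n → Spec_round_to_next5 n (round_to_next5 n)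

-- ===== LEMMAS AND PROOFS =====

theorem round_to_next5_loop_eq_aux (k : Nat) :
    ∀ n : Int, (PySem.Int.mod (-n) 5).toNat ≤ k → PySem.Int.mod n 5 ≠ 0 →
      round_to_next5_loop n = n + PySem.Int.mod (-n) 5 := by
  induction k with
  | zero =>
    intro n hk h
    simp only [pymod5] at *
    omega
  | succ k ih =>
    intro n hk h
    rw [round_to_next5_loop]
    by_cases h1 : PySem.Int.mod (n + 1) 5 = 0
    · simp only [h1, if_true]
      simp only [pymod5] at *
      omega
    · simp only [h1, if_false]
      rw [ih (n + 1) (by simp only [pymod5] at *; omega) h1]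
      simp only [pymod5] at *
      omega

theorem round_to_next5_loop_eq (n : Int) (h : PySem.Int.mod n 5 ≠ 0) :
    round_to_next5_loop n = n + PySem.Int.mod (-n) 5 :=
  round_to_next5_loop_eq_aux (PySem.Int.mod (-n) 5).toNat n le_rfl h

-- ===== VERDICT (by name: the statement is the Claim_ definition above) =====
theorem round_to_next5_spec : Claim_equal_round_to_next5 := by
  intro n _
  unfold Spec_round_to_next5 round_to_next5 round_to_next5_alt
  split_ifs with h
  · simp only [pymod5] at *
    omega
  · exact round_to_next5_loop_eq n h
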